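-- pv_equiv track=rewrite | github.com/ifeech/advent_of_code | 2023/day3/1.py | get_numbers_and_symbols_positions
-- ===== SOURCE A (Python) =====
-- SERVICE_SYMBOL = "."
--
-- def get_numbers_and_symbols_positions(s: str) -> dict:
--     numbers = []
--     symbols = []
--
--     number = ""
--     number_position = []
--
--     for index, char in enumerate(s):
--         if char.isdigit():
--             # forming a number by digit
--             number += char
--             number_position.append(index)
--         elif number.isdigit():
--             # saving the generated number when the current character is not a digit
--             numbers.append((number, number_position[0], number_position[-1]))
--
--             number = ""
--             number_position = []
--
--         if not char.isdigit() and char != SERVICE_SYMBOL: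
--             symbols.append((char, index, index))
--
--     # if the number is at the end of the string
--     if number.isdigit():
--         numbers.append((number, number_position[0], number_position[-1]))
--
--     return {
--         "numbers": numbers,
--         "symbols": symbols,
--     }
-- ===== SOURCE B (Python) =====
-- SERVICE_SYMBOL = "."
--
--
-- def get_numbers_and_symbols_positions(s: str) -> dict:
--     numbers = []
--     n = len(s)
--     i = 0
--     while i < n:
--         if s[i].isdigit():
--             j = i + 1
--             while j < n and s[j].isdigit():
--                 j += 1
--             numbers.append((s[i:j], i, j - 1))
--             i = j
--         else:
--             i += 1
--     symbols = [(c, k, k) for k, c in enumerate(s)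
--                if not c.isdigit() and c != SERVICE_SYMBOL]
--     return {"numbers": numbers, "symbols": symbols}
-- ===== Notes on version B (the rewrite author's own statement) =====
-- stated objective: idiomatic
-- what changed: Replaces A's char-by-char accumulator (digit buffer + position list carried across the loop) with an index-based run scanner that slices each whole digit run at once, plus a separate comprehension over enumerate(s) for symbols.
import Mathlib
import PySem

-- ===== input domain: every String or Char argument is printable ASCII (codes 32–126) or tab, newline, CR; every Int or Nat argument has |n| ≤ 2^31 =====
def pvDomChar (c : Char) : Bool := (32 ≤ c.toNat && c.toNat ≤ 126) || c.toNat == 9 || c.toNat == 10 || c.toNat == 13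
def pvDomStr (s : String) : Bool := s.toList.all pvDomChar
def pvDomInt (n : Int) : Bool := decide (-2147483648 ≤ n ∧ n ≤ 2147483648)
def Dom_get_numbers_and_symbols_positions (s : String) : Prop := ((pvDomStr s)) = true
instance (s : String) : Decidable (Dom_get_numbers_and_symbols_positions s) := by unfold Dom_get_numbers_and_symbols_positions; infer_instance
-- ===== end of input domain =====

-- B replaces A's running digit-buffer/position-list accumulator by an index-based
-- whole-run scanner plus a separate symbols pass (idiomatic, same cost).

-- ===== PORT A =====
-- the loop body of A's for-loop (state = (numbers, symbols, number, number_position));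
-- the Python string `number` is carried as its List Char
def pvAStep (st : List (String × Int × Int) × List (String × Int × Int) × List Char × List Int)
    (ic : Int × Char) :
    List (String × Int × Int) × List (String × Int × Int) × List Char × List Int :=
  let numbers := st.1
  let symbols := st.2.1
  let number := st.2.2.1
  let pos := st.2.2.2
  let index := ic.1
  let char := ic.2
  let res :=
    if PySem.Chars.isdigit char then
      (numbers, number ++ [char], pos ++ [index])
    else if PySem.Chars.strIsdigit number then
      (numbers ++ [(String.ofList number, pos.headD 0, pos.getLastD 0)], ([] : List Char), ([] : List Int))
    else
      (numbers, number, pos)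
  let symbols :=
    if !PySem.Chars.isdigit char && char != '.' then
      symbols ++ [(String.ofList [char], index, index)]
    else symbols
  (res.1, symbols, res.2.1, res.2.2)

def get_numbers_and_symbols_positions (s : String) : List (String × List (String × Int × Int)) :=
  let fin := (PySem.List.enumerate s.toList 0).foldl pvAStep ([], [], [], [])
  let numbers :=
    if PySem.Chars.strIsdigit fin.2.2.1 then
      fin.1 ++ [(String.ofList fin.2.2.1, fin.2.2.2.headD 0, fin.2.2.2.getLastD 0)]
    else fin.1
  [("numbers", numbers), ("symbols", fin.2.1)]

-- ===== PORT B =====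
-- the outer while loop of B: at a digit the inner while/slice takes the whole run
def pvAltNumbers : List Char → Int → List (String × Int × Int)
  | [], _ => []
  | c :: cs, i =>
    if PySem.Chars.isdigit c then
      let run := List.takeWhile PySem.Chars.isdigit (c :: cs)
      (String.ofList run, i, i + run.length - 1) ::
        pvAltNumbers (List.dropWhile PySem.Chars.isdigit cs) (i + run.length)
    else
      pvAltNumbers cs (i + 1)
termination_by cs _ => cs.length
decreasing_by
  · exact Nat.lt_succ_of_le (List.length_dropWhile_le _ _)
  · simp

def get_numbers_and_symbols_positions_alt (s : String) : List (String × List (String × Int × Int)) :=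
  let numbers := pvAltNumbers s.toList 0
  let symbols := (PySem.List.enumerate s.toList 0).filterMap
    (fun ic => if !PySem.Chars.isdigit ic.2 && ic.2 != '.' then
        some (String.ofList [ic.2], ic.1, ic.1) else none)
  [("numbers", numbers), ("symbols", symbols)]

-- ===== PRECONDITION & SPEC =====
def Spec_get_numbers_and_symbols_positions (s : String) (out : List (String × List (String × Int × Int))) : Prop := out = get_numbers_and_symbols_positions_alt s
instance (s : String) (out : List (String × List (String × Int × Int))) : Decidable (Spec_get_numbers_and_symbols_positions s out) := by unfold Spec_get_numbers_and_symbols_positions; infer_instance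

-- ===== CLAIM (what is proved, stated in full; the proofs are below) =====
def Claim_equal_get_numbers_and_symbols_positions : Prop := ∀ (s : String), Dom_get_numbers_and_symbols_positions s → Spec_get_numbers_and_symbols_positions s (get_numbers_and_symbols_positions s)

-- ===== LEMMAS AND PROOFS =====

-- positions list carried by A while a run of length k ends just before index i
def pvPos (i k : Nat) : List Int :=
  (List.range k).map (fun (j : Nat) => (i : Int) - (k : Int) + (j : Int))

theorem pvPos_zero (i : Nat) : pvPos i 0 = [] := by simp [pvPos]

theorem pvPos_succ (i k : Nat) : pvPos (i + 1) (k + 1) = pvPos i k ++ [(i : Int)] := by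
  unfold pvPos
  rw [List.range_succ, List.map_append]
  congr 1
  · exact List.map_congr_left (fun j hj => by push_cast; ring)
  · simp only [List.map_cons, List.map_nil]
    congr 1
    push_cast; ring

theorem pvPos_headD (i k : Nat) : (pvPos i (k + 1)).headD 0 = (i : Int) - (k + 1) := by
  simp [pvPos, List.range_succ_eq_map]

theorem pvPos_getLastD (i k : Nat) : (pvPos i (k + 1)).getLastD 0 = (i : Int) - 1 := by
  simp [pvPos, List.range_succ]
  push_cast; ring

theorem takeWhile_append_of_all {α : Type} (p : α → Bool) (xs ys : List α)
    (h : ∀ x ∈ xs, p x = true) :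
    List.takeWhile p (xs ++ ys) = xs ++ List.takeWhile p ys := by
  induction xs with
  | nil => simp
  | cons a xs ih =>
    simp only [List.cons_append, List.takeWhile_cons, h a (by simp)]
    simp [ih (fun x hx => h x (by simp [hx]))]

theorem dropWhile_append_of_all {α : Type} (p : α → Bool) (xs ys : List α)
    (h : ∀ x ∈ xs, p x = true) :
    List.dropWhile p (xs ++ ys) = List.dropWhile p ys := by
  induction xs with
  | nil => simp
  | cons a xs ih =>
    simp only [List.cons_append, List.dropWhile_cons, h a (by simp)]
    simp [ih (fun x hx => h x (by simp [hx]))]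

theorem pvStrIsdigit_of_all (run : List Char) (hne : run ≠ [])
    (h : ∀ c ∈ run, PySem.Chars.isdigit c = true) :
    PySem.Chars.strIsdigit run = true := by
  simp only [PySem.Chars.strIsdigit, Bool.and_eq_true, Bool.not_eq_eq_eq_not, Bool.not_true,
    List.isEmpty_eq_false_iff, List.all_eq_true]
  exact ⟨hne, h⟩

-- unfolding B at a nonempty all-digit run followed by a non-digit (or end of string)
theorem pvAltNumbers_run (run : List Char) (cs : List Char) (a : Int)
    (hne : run ≠ []) (hrun : ∀ c ∈ run, PySem.Chars.isdigit c = true)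
    (hcs : ∀ c, cs.head? = some c → PySem.Chars.isdigit c = false) :
    pvAltNumbers (run ++ cs) a
      = (String.ofList run, a, a + run.length - 1) :: pvAltNumbers cs (a + run.length) := by
  match run, hne with
  | d :: run', _ =>
    have hd : PySem.Chars.isdigit d = true := hrun d (by simp)
    have htw : List.takeWhile PySem.Chars.isdigit ((d :: run') ++ cs)
        = (d :: run') ++ List.takeWhile PySem.Chars.isdigit cs :=
      takeWhile_append_of_all _ _ _ hrun
    have htwcs : List.takeWhile PySem.Chars.isdigit cs = [] := by
      cases cs with
      | nil => rfl
      | cons c cs' => simp [List.takeWhile_cons, hcs c rfl]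
    have hdw : List.dropWhile PySem.Chars.isdigit (run' ++ cs)
        = List.dropWhile PySem.Chars.isdigit cs :=
      dropWhile_append_of_all _ _ _ (fun x hx => hrun x (by simp [hx]))
    have hdwcs : List.dropWhile PySem.Chars.isdigit cs = cs := by
      cases cs with
      | nil => rfl
      | cons c cs' => simp [List.dropWhile_cons, hcs c rfl]
    rw [List.cons_append, pvAltNumbers]
    simp only [hd, if_true]
    rw [show (d :: (run' ++ cs)) = (d :: run') ++ cs from rfl, htw, htwcs, hdw, hdwcs]
    simp

-- the symbols produced by B from index i on
def pvSyms (cs : List Char) (i : Int) : List (String × Int × Int) :=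
  (PySem.List.enumerate cs i).filterMap
    (fun ic => if !PySem.Chars.isdigit ic.2 && ic.2 != '.' then
        some (String.ofList [ic.2], ic.1, ic.1) else none)

-- A's end-of-loop flush
def pvFinish (st : List (String × Int × Int) × List (String × Int × Int) × List Char × List Int) :
    List (String × Int × Int) × List (String × Int × Int) :=
  (if PySem.Chars.strIsdigit st.2.2.1 then
      st.1 ++ [(String.ofList st.2.2.1, st.2.2.2.headD 0, st.2.2.2.getLastD 0)]
    else st.1,
   st.2.1)

theorem pvSyms_cons (c : Char) (cs : List Char) (i : Int) :
    pvSyms (c :: cs) i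
      = (if !PySem.Chars.isdigit c && c != '.' then
          [(String.ofList [c], i, i)] else []) ++ pvSyms cs (i + 1) := by
  simp only [pvSyms, PySem.List.enumerate_cons, List.filterMap_cons]
  by_cases h : (!PySem.Chars.isdigit c && c != '.') = true
  · simp [h]
  · simp only [Bool.not_eq_true] at h
    simp [h]

-- main invariant: A's loop from index i with a pending all-digit run equals
-- nums ++ B's runs over (run ++ rest), and syms ++ B's symbols over rest
theorem pvLoop_eq (cs : List Char) : ∀ (i : Nat) (nums syms : List (String × Int × Int))
    (run : List Char), (∀ c ∈ run, PySem.Chars.isdigit c = true) →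
    pvFinish ((PySem.List.enumerate cs (i : Int)).foldl pvAStep
        (nums, syms, run, pvPos i run.length))
      = (nums ++ pvAltNumbers (run ++ cs) ((i : Int) - run.length),
         syms ++ pvSyms cs i) := by
  induction cs with
  | nil =>
    intro i nums syms run hrun
    simp only [PySem.List.enumerate_nil, List.foldl_nil, pvFinish, pvSyms, List.filterMap_nil,
      List.append_nil]
    cases run with
    | nil => simp [PySem.Chars.strIsdigit, pvAltNumbers]
    | cons d run' =>
      have hne : (d :: run') ≠ [] := by simp
      rw [pvStrIsdigit_of_all _ hne hrun]
      have hruns := pvAltNumbers_run (d :: run') [] ((i : Int) - (d :: run').length) hne hrun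
        (by intro c hc; simp at hc)
      rw [List.append_nil] at hruns
      rw [hruns]
      simp only [pvAltNumbers, if_true]
      rw [show (d :: run').length = run'.length + 1 from by simp, pvPos_headD, pvPos_getLastD]
      simp only [Prod.mk.injEq, List.append_cancel_left_eq, List.cons.injEq,
        and_true]
      exact ⟨trivial, by push_cast; ring, by push_cast; ring⟩
  | cons c cs ih =>
    intro i nums syms run hrun
    rw [PySem.List.enumerate_cons, List.foldl_cons]
    have hcast : ((i : Int) + 1) = (((i + 1 : Nat)) : Int) := by push_cast; ring
    by_cases hc : PySem.Chars.isdigit c = true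
    · -- digit: the run grows, no symbol, no number emitted
      have hs : (!PySem.Chars.isdigit c && c != '.') = false := by simp [hc]
      have hstate : pvAStep (nums, syms, run, pvPos i run.length) ((i : Int), c)
          = (nums, syms, run ++ [c], pvPos (i + 1) (run ++ [c]).length) := by
        simp [pvAStep, hc, pvPos_succ]
      have hrun' : ∀ x ∈ run ++ [c], PySem.Chars.isdigit x = true := by
        intro x hx
        rcases List.mem_append.mp hx with h | h
        · exact hrun x h
        · simp at h; subst h; exact hc
      have ih' := ih (i + 1) nums syms (run ++ [c]) hrun'
      rw [show (run ++ [c]) ++ cs = run ++ c :: cs from by simp] at ih'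
      rw [show (((i + 1 : Nat)) : Int) - ((run ++ [c]).length : Int) = (i : Int) - run.length
        from by simp only [List.length_append, List.length_cons, List.length_nil]; push_cast; ring] at ih'
      rw [hstate, hcast, ih', pvSyms_cons, hcast]
      simp [hs]
    · -- non-digit: flush the pending number (if any) and maybe record a symbol
      have hcb : PySem.Chars.isdigit c = false := by simpa using hc
      cases run with
      | nil =>
        have hstate : pvAStep (nums, syms, [], pvPos i 0) ((i : Int), c)
            = (nums,
               (if !PySem.Chars.isdigit c && c != '.' then
                  syms ++ [(String.ofList [c], (i : Int), (i : Int))] else syms),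
               [], pvPos (i + 1) 0) := by
          simp [pvAStep, hcb, PySem.Chars.strIsdigit, pvPos_zero]
        have ih' := ih (i + 1) nums
          (if !PySem.Chars.isdigit c && c != '.' then
              syms ++ [(String.ofList [c], (i : Int), (i : Int))] else syms)
          [] (by simp)
        simp only [List.length_nil, List.nil_append] at ih' ⊢
        rw [hstate, hcast, ih', pvSyms_cons, hcast]
        have halt : pvAltNumbers (c :: cs) ((i : Int) - ((0 : Nat) : Int))
            = pvAltNumbers cs (((i + 1 : Nat) : Int) - ((0 : Nat) : Int)) := by
          rw [pvAltNumbers]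
          simp only [hcb, Bool.false_eq_true, if_false]
          rw [show (i : Int) - ((0 : Nat) : Int) + 1 = ((i + 1 : Nat) : Int) - ((0 : Nat) : Int)
            from by push_cast; ring]
        rw [halt]
        split_ifs with h <;> simp [List.append_assoc]
      | cons d run' =>
        have hne : (d :: run') ≠ [] := by simp
        have hdg : PySem.Chars.strIsdigit (d :: run') = true :=
          pvStrIsdigit_of_all _ hne hrun
        have hstate : pvAStep (nums, syms, d :: run', pvPos i (d :: run').length) ((i : Int), c)
            = (nums ++ [(String.ofList (d :: run'), (pvPos i (d :: run').length).headD 0,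
                  (pvPos i (d :: run').length).getLastD 0)],
               (if !PySem.Chars.isdigit c && c != '.' then
                  syms ++ [(String.ofList [c], (i : Int), (i : Int))] else syms),
               [], pvPos (i + 1) 0) := by
          simp [pvAStep, hcb, hdg, pvPos_zero]
        have ih' := ih (i + 1)
          (nums ++ [(String.ofList (d :: run'), (pvPos i (d :: run').length).headD 0,
              (pvPos i (d :: run').length).getLastD 0)])
          (if !PySem.Chars.isdigit c && c != '.' then
              syms ++ [(String.ofList [c], (i : Int), (i : Int))] else syms)
          [] (by simp)
        simp only [List.length_nil, List.nil_append] at ih'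
        rw [hstate, hcast, ih', pvSyms_cons, hcast]
        have hruns := pvAltNumbers_run (d :: run') (c :: cs) ((i : Int) - (d :: run').length)
          hne hrun (by intro x hx; simp at hx; subst hx; exact hcb)
        rw [hruns]
        have halt : pvAltNumbers (c :: cs) ((i : Int) - ((d :: run').length : Int)
              + ((d :: run').length : Int))
            = pvAltNumbers cs (((i + 1 : Nat) : Int) - ((0 : Nat) : Int)) := by
          rw [show (i : Int) - ((d :: run').length : Int) + ((d :: run').length : Int) = (i : Int)
            from by ring]
          rw [pvAltNumbers]
          simp only [hcb, Bool.false_eq_true, if_false]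
          rw [show (i : Int) + 1 = ((i + 1 : Nat) : Int) - ((0 : Nat) : Int)
            from by push_cast; ring]
        rw [halt]
        rw [show (d :: run').length = run'.length + 1 from by simp, pvPos_headD, pvPos_getLastD]
        simp only [Prod.mk.injEq]
        refine ⟨?_, by split_ifs with h <;> simp [List.append_assoc]⟩
        rw [List.append_assoc, List.singleton_append]
        have e1 : (i : Int) - ((run'.length : Int) + 1)
            = (i : Int) - ((run'.length + 1 : Nat) : Int) := by push_cast; ring
        have e2 : (i : Int) - ((run'.length + 1 : Nat) : Int) + ((run'.length + 1 : Nat) : Int) - 1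
            = (i : Int) - 1 := by push_cast; ring
        rw [e1, e2]

-- ===== VERDICT (by name: the statement is the Claim_ definition above) =====
theorem get_numbers_and_symbols_positions_spec : Claim_equal_get_numbers_and_symbols_positions := by
  intro s _
  unfold Spec_get_numbers_and_symbols_positions
  have h := pvLoop_eq s.toList 0 [] [] [] (by simp)
  simp only [List.length_nil, pvPos_zero, List.nil_append, Nat.cast_zero, Int.sub_zero,
    pvFinish, pvSyms] at h
  rw [Prod.ext_iff] at h
  obtain ⟨h1, h2⟩ := h
  simp only at h1 h2
  simp only [get_numbers_and_symbols_positions, get_numbers_and_symbols_positions_alt]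
  rw [h1, h2]
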